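-- pv_equiv track=rewrite | github.com/chandharlabs/Deep-Radio | Live-Tx-Rx-GNURadio/qpsk_rx_epy_block_0.py | _burst_downsample_from_peak
-- ===== SOURCE A (Python) =====
-- def _burst_downsample_from_peak(values, zero_gap_threshold=120):
--     result = []
--     last_index = None
--     i = 0
--     n = len(values)
--
--     while i < n:
--         if values[i] != 0:
--             start = i
--             sym = values[i]
--             while i < n and values[i] == sym:
--                 i += 1
--             if last_index is not None and (start - last_index) > zero_gap_threshold:
--                 result.append(0)
--             result.append(sym)
--             last_index = start
--         else:
--             i += 1
--
--     return result
-- ===== SOURCE B (Python) =====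
-- def _burst_downsample_from_peak(values, zero_gap_threshold=120):
--     # A run start is an index whose value is nonzero and differs from its predecessor
--     # (predecessor of index 0 taken as 0, which is never a nonzero run symbol).
--     runs = [(i, v) for i, (prev, v) in enumerate(zip([0] + list(values), values))
--             if v != 0 and prev != v]
--     result = []
--     last = None
--     for start, sym in runs:
--         if last is not None and start - last > zero_gap_threshold:
--             result.append(0)
--         result.append(sym)
--         last = start
--     return result
-- ===== Notes on version B (the rewrite author's own statement) =====
-- stated objective: simpler
-- what changed: Replaces A's single index loop with a nested run-consuming inner while by a two-pass decomposition: a zip/enumerate comprehension that detects run starts (value nonzero and different from its predecessor), then a plain fold over those (start, symbol) descriptors that inserts a 0 on large gaps.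
import Mathlib
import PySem

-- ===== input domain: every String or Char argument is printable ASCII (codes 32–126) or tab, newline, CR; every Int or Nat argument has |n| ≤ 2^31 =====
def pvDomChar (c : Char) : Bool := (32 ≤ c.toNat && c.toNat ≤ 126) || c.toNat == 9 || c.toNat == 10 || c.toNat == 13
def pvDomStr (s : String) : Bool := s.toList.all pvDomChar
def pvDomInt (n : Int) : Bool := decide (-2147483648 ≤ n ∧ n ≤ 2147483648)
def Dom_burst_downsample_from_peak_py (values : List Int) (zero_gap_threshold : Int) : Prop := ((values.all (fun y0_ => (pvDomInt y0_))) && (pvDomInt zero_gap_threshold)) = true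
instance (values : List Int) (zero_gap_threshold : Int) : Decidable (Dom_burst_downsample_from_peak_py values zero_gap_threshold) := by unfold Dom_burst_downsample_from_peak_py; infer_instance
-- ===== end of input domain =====

-- B replaces A's single index loop with nested run-consuming while by a two-pass
-- decomposition: a zip/comprehension detecting run starts, then a fold emitting gaps
-- (objective: simpler; same return value, no side effects).

-- ===== PORT A =====
-- inner `while i < n and values[i] == sym: i += 1` applied to the tail after values[i]:
-- returns (number of further equal elements consumed, remaining list)
def pvTakeRun (sym : Int) : List Int → Nat × List Int
  | [] => (0, [])
  | x :: xs =>
    if x = sym then ((pvTakeRun sym xs).1 + 1, (pvTakeRun sym xs).2)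
    else (0, x :: xs)

theorem pvTakeRun_len (sym : Int) (l : List Int) : (pvTakeRun sym l).2.length ≤ l.length := by
  induction l with
  | nil => simp [pvTakeRun]
  | cons x xs ih =>
    simp only [pvTakeRun]
    split_ifs with h
    · exact Nat.le_succ_of_le ih
    · exact Nat.le_refl _

-- the outer while loop of A, over the remaining suffix (i = absolute index of its head)
def pvLoopA (t : Int) : List Int → Nat → Option Int → List Int → List Int
  | [], _, _, result => result
  | x :: xs, i, last, result =>
    if x ≠ 0 then
      pvLoopA t (pvTakeRun x xs).2 (i + 1 + (pvTakeRun x xs).1) (some (i : Int))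
        ((match last with
          | some l => if (i : Int) - l > t then result ++ [0] else result
          | none => result) ++ [x])
    else
      pvLoopA t xs (i + 1) last result
  termination_by l => l.length
  decreasing_by
  · exact Nat.lt_succ_of_le (pvTakeRun_len x xs)
  · exact Nat.lt_succ_self _

def burst_downsample_from_peak_py (values : List Int) (zero_gap_threshold : Int) : List Int :=
  pvLoopA zero_gap_threshold values 0 none []

-- ===== PORT B =====
-- second pass of B: emit symbols, inserting 0 on large gaps
def pvEmit (t : Int) : List (Int × Int) → Option Int → List Int → List Int
  | [], _, result => result
  | (start, sym) :: rest, last, result =>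
    pvEmit t rest (some start)
      ((match last with
        | some l => if start - l > t then result ++ [0] else result
        | none => result) ++ [sym])

def burst_downsample_from_peak_py_alt (values : List Int) (zero_gap_threshold : Int) : List Int :=
  -- first pass: [(i, v) for i, (prev, v) in enumerate(zip([0]+list(values), values)) if v != 0 and prev != v]
  let runs : List (Int × Int) :=
    (PySem.List.enumerate ((0 :: values).zip values)).filterMap
      (fun ipv => if ipv.2.2 ≠ 0 ∧ ipv.2.1 ≠ ipv.2.2 then some (ipv.1, ipv.2.2) else none)
  pvEmit zero_gap_threshold runs none []

-- ===== PRECONDITION & SPEC =====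
def Spec_burst_downsample_from_peak_py (values : List Int) (zero_gap_threshold : Int) (out : List Int) : Prop := out = burst_downsample_from_peak_py_alt values zero_gap_threshold
instance (values : List Int) (zero_gap_threshold : Int) (out : List Int) : Decidable (Spec_burst_downsample_from_peak_py values zero_gap_threshold out) := by unfold Spec_burst_downsample_from_peak_py; infer_instance

-- ===== CLAIM (what is proved, stated in full; the proofs are below) =====
def Claim_equal_burst_downsample_from_peak_py : Prop := ∀ (values : List Int) (zero_gap_threshold : Int), Dom_burst_downsample_from_peak_py values zero_gap_threshold → Spec_burst_downsample_from_peak_py values zero_gap_threshold (burst_downsample_from_peak_py values zero_gap_threshold)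

-- ===== LEMMAS AND PROOFS =====

-- recursive characterisation of B's run-start list (p = value preceding l)
def pvRspec (p : Int) (l : List Int) (i : Nat) : List (Int × Int) :=
  match l with
  | [] => []
  | x :: xs => (if x ≠ 0 ∧ p ≠ x then [((i : Int), x)] else []) ++ pvRspec x xs (i + 1)

-- the run-start list A's loop walks through
def pvRunsA : List Int → Nat → List (Int × Int)
  | [], _ => []
  | x :: xs, i =>
    if x ≠ 0 then
      ((i : Int), x) :: pvRunsA (pvTakeRun x xs).2 (i + 1 + (pvTakeRun x xs).1)
    else
      pvRunsA xs (i + 1)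
  termination_by l => l.length
  decreasing_by
  · exact Nat.lt_succ_of_le (pvTakeRun_len x xs)
  · exact Nat.lt_succ_self _

theorem pvTakeRun_head (sym : Int) (l : List Int) : (pvTakeRun sym l).2.head? ≠ some sym := by
  induction l with
  | nil => simp [pvTakeRun]
  | cons x xs ih =>
    simp only [pvTakeRun]
    split_ifs with h
    · exact ih
    · simpa using h

theorem pvRspec_takeRun (sym : Int) (xs : List Int) (j : Nat) :
    pvRspec sym xs j = pvRspec sym (pvTakeRun sym xs).2 (j + (pvTakeRun sym xs).1) := by
  induction xs generalizing j with
  | nil => simp [pvTakeRun]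
  | cons y ys ih =>
    by_cases h : y = sym
    · subst h
      have h1 : pvTakeRun y (y :: ys) = ((pvTakeRun y ys).1 + 1, (pvTakeRun y ys).2) := by
        simp [pvTakeRun]
      rw [h1, pvRspec, if_neg (by simp), List.nil_append, ih (j + 1)]
      congr 1
      omega
    · simp [pvTakeRun, fun hx : y = sym => h hx]

theorem pvRunsA_eq_rspec (n : Nat) : ∀ l : List Int, l.length ≤ n → ∀ (i : Nat) (p : Int),
    (p = 0 ∨ l.head? ≠ some p) → pvRunsA l i = pvRspec p l i := by
  induction n with
  | zero =>
    intro l hl i p _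
    have : l = [] := List.eq_nil_of_length_eq_zero (Nat.le_zero.mp hl)
    subst this; simp [pvRunsA, pvRspec]
  | succ n ih =>
    intro l hl i p hp
    match l with
    | [] => simp [pvRunsA, pvRspec]
    | x :: xs =>
      by_cases hx : x = 0
      · subst hx
        rw [pvRunsA, if_neg (by simp), pvRspec, if_neg (by simp), List.nil_append]
        exact ih xs (by simpa using Nat.lt_succ_iff.mp (Nat.lt_of_lt_of_le (Nat.lt_succ_self _) hl)) (i + 1) 0 (Or.inl rfl)
      · have hpx : p ≠ x := by
          rcases hp with h0 | hh
          · subst h0; exact fun h => hx h.symm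
          · intro h; exact hh (by simp [h])
        rw [pvRunsA, if_pos hx, pvRspec, if_pos ⟨hx, hpx⟩]
        have hlen : (pvTakeRun x xs).2.length ≤ n := by
          have := pvTakeRun_len x xs
          simp only [List.length_cons] at hl
          omega
        rw [ih (pvTakeRun x xs).2 hlen (i + 1 + (pvTakeRun x xs).1) x
              (Or.inr (pvTakeRun_head x xs))]
        rw [pvRspec_takeRun x xs (i + 1)]
        simp [Nat.add_comm]
  
theorem pvLoopA_emit (t : Int) (n : Nat) : ∀ l : List Int, l.length ≤ n →
    ∀ (i : Nat) (last : Option Int) (result : List Int),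
    pvLoopA t l i last result = pvEmit t (pvRunsA l i) last result := by
  induction n with
  | zero =>
    intro l hl i last result
    have : l = [] := List.eq_nil_of_length_eq_zero (Nat.le_zero.mp hl)
    subst this; simp [pvLoopA, pvRunsA, pvEmit]
  | succ n ih =>
    intro l hl i last result
    match l with
    | [] => simp [pvLoopA, pvRunsA, pvEmit]
    | x :: xs =>
      by_cases hx : x ≠ 0
      · rw [pvLoopA.eq_def]
        simp only [if_pos hx]
        rw [pvRunsA, if_pos hx]; simp only [pvEmit]
        exact ih (pvTakeRun x xs).2
          (by have := pvTakeRun_len x xs; simp only [List.length_cons] at hl; omega)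
          _ _ _
      · rw [pvLoopA.eq_def]
        simp only [if_neg hx]
        rw [pvRunsA, if_neg hx]
        exact ih xs (by simp only [List.length_cons] at hl; omega) _ _ _

theorem pvFilter_eq_rspec : ∀ (l : List Int) (p : Int) (i : Nat),
    (PySem.List.enumerate ((p :: l).zip l) (i : Int)).filterMap
      (fun ipv => if ipv.2.2 ≠ 0 ∧ ipv.2.1 ≠ ipv.2.2 then some (ipv.1, ipv.2.2) else none)
    = pvRspec p l i := by
  intro l
  induction l with
  | nil => intro p i; simp [pvRspec]
  | cons x xs ih =>
    intro p i
    have hz : (p :: x :: xs).zip (x :: xs) = (p, x) :: ((x :: xs).zip xs) := rfl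
    rw [hz, PySem.List.enumerate_cons, List.filterMap_cons, pvRspec]
    have hcast : ((i : Int) + 1) = ((i + 1 : Nat) : Int) := by push_cast; ring
    by_cases h : x ≠ 0 ∧ p ≠ x
    · simp only [if_pos h, hcast, ih x (i + 1)]
      rfl
    · simp only [if_neg h, hcast, ih x (i + 1), List.nil_append]

-- ===== VERDICT (by name: the statement is the Claim_ definition above) =====
theorem burst_downsample_from_peak_py_spec : Claim_equal_burst_downsample_from_peak_py := by
  intro values t _
  show burst_downsample_from_peak_py values t = burst_downsample_from_peak_py_alt values t
  unfold burst_downsample_from_peak_py burst_downsample_from_peak_py_alt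
  rw [pvLoopA_emit t values.length values (Nat.le_refl _),
      pvRunsA_eq_rspec values.length values (Nat.le_refl _) 0 0 (Or.inl rfl),
      ← pvFilter_eq_rspec values 0 0]
  norm_num
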